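-- pv_equiv track=rewrite | github.com/levivandepol/Gijswijt-sequences | nu_m.py | krul
-- ===== SOURCE A (Python) =====
-- def krul(L):
--     l=len(L)
--     candidate=1
--     period=0
--     for x in range(1,int((l+2)/2)):
--         M=L[l-x:l]
--         N=L[l-2*x:l-x]
--         i=1
--         while(M==N and i*x<l):
--             i=i+1
--             N=L[l-(i+1)*x:l-i*x]
--         if i>candidate:
--             candidate=i
--     return candidate
-- ===== SOURCE B (Python) =====
-- def krul(L):
--     R = L[::-1]
--     l = len(R)
--     best = 1
--     for x in range(1, l // 2 + 1):
--         # longest common extension of R and R shifted by x (element-wise)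
--         m = 0
--         while x + m < l and R[m] == R[x + m]:
--             m += 1
--         reps = m // x + 1
--         if reps > best:
--             best = reps
--     return best
-- ===== Notes on version B (the rewrite author's own statement) =====
-- stated objective: alternative
-- what changed: Instead of repeatedly slicing out length-x suffix blocks and comparing them list-by-list until a mismatch, B reverses the list once and, for each period x, computes the element-wise longest common extension between the reversed list and its x-shift, obtaining the repetition count as m//x+1 by integer division.
import Mathlib
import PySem

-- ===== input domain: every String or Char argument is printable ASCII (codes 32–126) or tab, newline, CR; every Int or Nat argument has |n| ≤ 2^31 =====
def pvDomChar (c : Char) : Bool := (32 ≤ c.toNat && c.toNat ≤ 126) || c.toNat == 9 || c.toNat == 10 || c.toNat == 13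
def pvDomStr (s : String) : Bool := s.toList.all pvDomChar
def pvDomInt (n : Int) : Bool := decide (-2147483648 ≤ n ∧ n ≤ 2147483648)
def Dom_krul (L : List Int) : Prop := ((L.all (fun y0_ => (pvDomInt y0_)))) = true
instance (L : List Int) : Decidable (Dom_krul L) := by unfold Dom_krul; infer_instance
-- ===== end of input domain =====

-- B replaces A's repeated block-slicing-and-comparison per period x by a single
-- element-wise longest-common-extension scan on the reversed list plus one integer
-- division (objective: alternative decomposition, same worst-case cost).

-- ===== PORT A =====
-- the inner while-loop of A; fuel only makes the recursion total (provably never exhausted)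
def krulWhileA (L : List Int) (l x : Int) (M : List Int) : Nat → Int → List Int → Int
  | 0, i, _ => i
  | fuel+1, i, N =>
    if M = N ∧ i * x < l then
      krulWhileA L l x M fuel (i+1)
        (PySem.List.slice L (some (l-(i+1+1)*x)) (some (l-(i+1)*x)))
    else i

def krul (L : List Int) : Int :=
  let l : Int := PySem.List.len L
  -- int((l+2)/2): l ≥ 0 and l+2 is exact as a float, so this is floor division
  (PySem.List.pyRange 1 (PySem.Int.floordiv (l+2) 2) 1).foldl
    (fun candidate x =>
      let M := PySem.List.slice L (some (l-x)) (some l)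
      let N := PySem.List.slice L (some (l-2*x)) (some (l-x))
      let i := krulWhileA L l x M l.natAbs 1 N
      if candidate < i then i else candidate) 1

-- ===== PORT B =====
-- B's inner while-loop: element-wise match length between R and R shifted by x
def krulLceB (R : List Int) (l x : Int) : Nat → Int → Int
  | 0, m => m
  | fuel+1, m =>
    if x + m < l ∧ PySem.List.pyGet? R m = PySem.List.pyGet? R (x + m) then
      krulLceB R l x fuel (m+1)
    else m

def krul_alt (L : List Int) : Int :=
  let R := (PySem.List.slice? L none none (-1)).getD []   -- L[::-1]
  let l : Int := PySem.List.len R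
  (PySem.List.pyRange 1 (PySem.Int.floordiv l 2 + 1) 1).foldl
    (fun best x =>
      let m := krulLceB R l x l.natAbs 0
      let reps := PySem.Int.floordiv m x + 1
      if best < reps then reps else best) 1

-- ===== PRECONDITION & SPEC =====
def Spec_krul (L : List Int) (out : Int) : Prop := out = krul_alt L
instance (L : List Int) (out : Int) : Decidable (Spec_krul L out) := by unfold Spec_krul; infer_instance

-- ===== CLAIM (what is proved, stated in full; the proofs are below) =====
def Claim_equal_krul : Prop := ∀ (L : List Int), Dom_krul L → Spec_krul L (krul L)

-- ===== LEMMAS AND PROOFS =====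

-- mathematical longest-common-extension: first j' ≥ j with a mismatch between R[j'] and R[j'+x]
def lceGo (R : List Int) (n x j : Nat) : Nat :=
  if h : j + x < n ∧ R[j]? = R[j + x]? then lceGo R n x (j+1) else j
termination_by n - j
decreasing_by omega

-- the j-th length-x block of R
def segR (R : List Int) (x j : Nat) : List Int := (R.drop (j*x)).take x

theorem lceGo_matches (R : List Int) (n x j t : Nat) (h1 : j ≤ t) (h2 : t < lceGo R n x j) :
    t + x < n ∧ R[t]? = R[t + x]? := by
  fun_induction lceGo R n x j with
  | case1 j h ih =>
      rcases Nat.eq_or_lt_of_le h1 with rfl | hlt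
      · exact h
      · exact ih hlt h2
  | case2 j h => omega

theorem lceGo_stop (R : List Int) (n x j : Nat) :
    ¬ (lceGo R n x j + x < n ∧ R[lceGo R n x j]? = R[lceGo R n x j + x]?) := by
  fun_induction lceGo R n x j with
  | case1 j h ih => exact ih
  | case2 j h => exact h

theorem le_lceGo_of (R : List Int) (n x m : Nat)
    (h : ∀ t, t < m → t + x < n ∧ R[t]? = R[t + x]?) : m ≤ lceGo R n x 0 := by
  by_contra hc
  exact lceGo_stop R n x 0 (h _ (by omega))

theorem lceGo_add_le (R : List Int) (n x : Nat) (hn : n = R.length) (hx : x ≤ n) :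
    lceGo R n x 0 + x ≤ n := by
  rcases Nat.eq_zero_or_pos (lceGo R n x 0) with h0 | h0
  · omega
  · have := lceGo_matches R n x 0 (lceGo R n x 0 - 1) (by omega) (by omega)
    omega

theorem length_segR (R : List Int) (x j : Nat) (h : (j+1)*x ≤ R.length) :
    (segR R x j).length = x := by
  have h' : j*x + x ≤ R.length := by rw [Nat.succ_mul] at h; omega
  simp [segR]; omega

theorem segR_eq_iff (R : List Int) (x j : Nat) (h : (j+2)*x ≤ R.length) :
    segR R x j = segR R x (j+1) ↔ ∀ r, r < x → R[j*x+r]? = R[(j+1)*x+r]? := by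
  have hh : j*x + x + x ≤ R.length := by
    have e : (j+2)*x = j*x + x + x := by ring
    omega
  rw [List.ext_getElem?_iff]
  constructor
  · intro he r hr
    have := he r
    simpa [segR, List.getElem?_take, List.getElem?_drop, hr] using this
  · intro he r
    by_cases hr : r < x
    · simpa [segR, List.getElem?_take, List.getElem?_drop, hr] using he r hr
    · have l1 : (segR R x j).length = x := length_segR R x j (by
        have e : (j+1)*x = j*x + x := by ring
        omega)
      have l2 : (segR R x (j+1)).length = x := length_segR R x (j+1) (by
        have e : (j+1+1)*x = j*x + x + x := by ring
        omega)
      rw [List.getElem?_eq_none (by omega), List.getElem?_eq_none (by omega)]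

theorem seg_chain (R : List Int) (n x : Nat) (hn : n = R.length) (hx : 1 ≤ x) (hx2 : 2*x ≤ n)
    (j : Nat) (hj : j*x ≤ lceGo R n x 0) : segR R x 0 = segR R x j := by
  induction j with
  | zero => rfl
  | succ j ih =>
    have hjx : j*x ≤ lceGo R n x 0 := by
      have e : (j+1)*x = j*x + x := by ring
      omega
    have hle : lceGo R n x 0 + x ≤ n := lceGo_add_le R n x hn (by omega)
    have h2 : (j+2)*x ≤ R.length := by
      have e1 : (j+2)*x = (j+1)*x + x := by ring
      omega
    rw [ih hjx]
    rw [segR_eq_iff R x j h2]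
    intro r hr
    have ht : j*x + r < lceGo R n x 0 := by
      have e : (j+1)*x = j*x + x := by ring
      omega
    have := lceGo_matches R n x 0 (j*x + r) (by omega) ht
    have e2 : j*x + r + x = (j+1)*x + r := by ring
    rw [← e2]
    exact this.2

theorem drop_take_rev (L : List Int) (x j : Nat) (h : (j+1)*x ≤ L.length) :
    (L.drop (L.length - (j+1)*x)).take x = (segR L.reverse x j).reverse := by
  have e : (j+1)*x = j*x + x := by ring
  apply List.ext_getElem
  · simp [segR]; omega
  · intro i h1 h2
    simp only [segR, List.getElem_take, List.getElem_drop, List.getElem_reverse,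
      List.length_reverse, List.length_take, List.length_drop]
    congr 1
    simp [segR] at h1 h2
    omega

theorem slice_block (L : List Int) (x j : Nat) (h : (j+1)*x ≤ L.length) :
    PySem.List.slice L (some ((L.length:Int) - ((j:Int)+1)*(x:Int))) (some ((L.length:Int) - (j:Int)*(x:Int)))
      = (segR L.reverse x j).reverse := by
  have e : (j+1)*x = j*x + x := by ring
  have ha : (L.length:Int) - ((j:Int)+1)*(x:Int) = ((L.length - (j+1)*x : Nat) : Int) := by
    push_cast [Nat.cast_sub h]; ring
  have hb : (L.length:Int) - (j:Int)*(x:Int) = ((L.length - j*x : Nat) : Int) := by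
    push_cast [Nat.cast_sub (show j*x ≤ L.length by omega)]; ring
  rw [ha, hb, PySem.List.slice_natCast]
  have e2 : L.length - j*x - (L.length - (j+1)*x) = x := by omega
  rw [e2]
  exact drop_take_rev L x j h

theorem slice_block_short (L : List Int) (x i : Nat) (hx : 1 ≤ x) (hx2 : 2*x ≤ L.length)
    (h1 : i*x < L.length) (h2 : L.length < (i+1)*x) :
    (PySem.List.slice L (some ((L.length:Int) - ((i:Int)+1)*(x:Int))) (some ((L.length:Int) - (i:Int)*(x:Int)))).length = 0 := by
  have e : (i+1)*x = i*x + x := by ring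
  have ha : (L.length:Int) - ((i:Int)+1)*(x:Int) = -(((i+1)*x - L.length : Nat) : Int) := by
    push_cast [Nat.cast_sub (le_of_lt h2)]; ring
  have hb : (L.length:Int) - (i:Int)*(x:Int) = ((L.length - i*x : Nat) : Int) := by
    push_cast [Nat.cast_sub (le_of_lt h1)]; ring
  rw [ha, hb, PySem.List.length_slice, PySem.List.clampIdx_natCast,
    PySem.List.clampIdx_neg_natCast _ _ (by omega)]
  omega

theorem whileA_eq (L : List Int) (x : Nat) (hx : 1 ≤ x) (hx2 : 2*x ≤ L.length) :
    ∀ (fuel i : Nat), 1 ≤ i → (i-1)*x ≤ lceGo L.reverse L.length x 0 →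
      lceGo L.reverse L.length x 0 / x + 1 ≤ i + fuel →
    krulWhileA L (L.length:Int) (x:Int) ((segR L.reverse x 0).reverse) fuel (i:Int)
      (PySem.List.slice L (some ((L.length:Int) - ((i:Int)+1)*(x:Int))) (some ((L.length:Int) - (i:Int)*(x:Int))))
      = ((lceGo L.reverse L.length x 0 / x : Nat) : Int) + 1 := by
  have hn : L.length = L.reverse.length := by simp
  set n := L.length with hndef
  set R := L.reverse with hRdef
  set e := lceGo R n x 0 with hedef
  have hen : e + x ≤ n := lceGo_add_le R n x hn (by omega)
  intro fuel
  induction fuel with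
  | zero =>
    intro i hi hinv hf
    have h1 : i - 1 ≤ e / x := (Nat.le_div_iff_mul_le (by omega)).mpr hinv
    have : i = e / x + 1 := by omega
    subst this
    show (↑(e/x+1) : Int) = ↑(e/x) + 1
    push_cast; ring
  | succ fuel ih =>
    intro i hi hinv hf
    by_cases hcase : i*x ≤ e
    · -- guard true
      have hfull : (i+1)*x ≤ n := by
        have e1 : (i+1)*x = i*x + x := by ring
        omega
      have hN : PySem.List.slice L (some ((n:Int) - ((i:Int)+1)*(x:Int))) (some ((n:Int) - (i:Int)*(x:Int)))
          = (segR R x i).reverse := slice_block L x i hfull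
      have hseg : segR R x 0 = segR R x i := seg_chain R n x hn hx hx2 i hcase
      have hlt : (i:Int) * (x:Int) < (n:Int) := by
        have : i*x < n := by omega
        exact_mod_cast this
      rw [show krulWhileA L (n:Int) (x:Int) ((segR R x 0).reverse) (fuel+1) (i:Int)
            (PySem.List.slice L (some ((n:Int) - ((i:Int)+1)*(x:Int))) (some ((n:Int) - (i:Int)*(x:Int))))
          = krulWhileA L (n:Int) (x:Int) ((segR R x 0).reverse) fuel ((i:Int)+1)
            (PySem.List.slice L (some ((n:Int)-((i:Int)+1+1)*(x:Int))) (some ((n:Int)-((i:Int)+1)*(x:Int)))) from by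
        simp only [krulWhileA]
        rw [if_pos ⟨by rw [hN, hseg], hlt⟩]]
      have ec : ((i:Int)+1) = (((i+1:Nat)):Int) := by push_cast; ring
      rw [ec]
      have := ih (i+1) (by omega) (by simpa using hcase) (by omega)
      convert this using 4
    · -- guard false: loop returns i
      have hMN : ¬ ((segR R x 0).reverse
            = PySem.List.slice L (some ((n:Int) - ((i:Int)+1)*(x:Int))) (some ((n:Int) - (i:Int)*(x:Int)))
          ∧ (i:Int) * (x:Int) < (n:Int)) := by
        rintro ⟨hM, hlt⟩
        have hin : i*x < n := by exact_mod_cast hlt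
        by_cases hfull : (i+1)*x ≤ n
        · have hN := slice_block L x i hfull
          rw [show PySem.List.slice L (some ((n:Int) - ((i:Int)+1)*(x:Int))) (some ((n:Int) - (i:Int)*(x:Int)))
              = (segR R x i).reverse from hN, List.reverse_inj] at hM
          obtain ⟨i1, rfl⟩ : ∃ i1, i = i1 + 1 := ⟨i - 1, by omega⟩
          have expi : (i1+1-1)*x = i1*x := by simp
          have exp : (i1+1)*x = i1*x + x := by ring
          have exp2 : (i1+1+1)*x = (i1+1)*x + x := by ring
          have hchain : segR R x 0 = segR R x i1 :=
            seg_chain R n x hn hx hx2 i1 (by omega)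
          have hcons : segR R x i1 = segR R x (i1+1) := by rw [← hchain, hM]
          have hpt := (segR_eq_iff R x i1 (by
            have e1 : (i1+2)*x = (i1+1+1)*x := by ring
            omega)).mp hcons
          have hle : (i1+1)*x ≤ e := by
            apply le_lceGo_of
            intro t ht
            by_cases htl : t < i1*x
            · exact lceGo_matches R n x 0 t (by omega) (by omega)
            · have hr : t - i1*x < x := by omega
              have hthis := hpt (t - i1*x) hr
              have e2 : i1*x + (t - i1*x) = t := by omega
              have e3 : (i1+1)*x + (t - i1*x) = t + x := by omega
              rw [e2, e3] at hthis
              exact ⟨by omega, hthis⟩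
          omega
        · have hshort := slice_block_short L x i hx hx2 hin (by omega)
          have hMlen : ((segR R x 0).reverse).length = x := by
            rw [List.length_reverse]
            exact length_segR R x 0 (by rw [← hn]; omega)
          rw [← hM] at hshort
          omega
      rw [show krulWhileA L (n:Int) (x:Int) ((segR R x 0).reverse) (fuel+1) (i:Int)
            (PySem.List.slice L (some ((n:Int) - ((i:Int)+1)*(x:Int))) (some ((n:Int) - (i:Int)*(x:Int))))
          = (i:Int) from by simp only [krulWhileA]; rw [if_neg hMN]]
      have h1 : i - 1 ≤ e / x := (Nat.le_div_iff_mul_le (by omega)).mpr hinv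
      have h2 : e / x < i := (Nat.div_lt_iff_lt_mul (by omega)).mpr (by omega)
      have : i = e / x + 1 := by omega
      rw [this]; push_cast; ring

theorem lceB_eq (R : List Int) (n x : Nat) :
    ∀ (fuel m : Nat), n - m ≤ fuel →
      krulLceB R (n:Int) (x:Int) fuel (m:Int) = ((lceGo R n x m : Nat) : Int) := by
  intro fuel
  induction fuel with
  | zero =>
    intro m hf
    rw [lceGo.eq_def, dif_neg (by omega)]
    rfl
  | succ fuel ih =>
    intro m hf
    have e : (x:Int) + (m:Int) = ((m + x : Nat) : Int) := by push_cast; ring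
    have hC : ((x:Int) + (m:Int) < (n:Int) ∧
        PySem.List.pyGet? R (m:Int) = PySem.List.pyGet? R ((x:Int) + (m:Int)))
        ↔ (m + x < n ∧ R[m]? = R[m + x]?) := by
      rw [e]
      simp only [PySem.List.pyGet?_natCast]
      constructor
      · rintro ⟨h1, h2⟩; exact ⟨by exact_mod_cast h1, h2⟩
      · rintro ⟨h1, h2⟩; exact ⟨by exact_mod_cast h1, h2⟩
    by_cases hg : m + x < n ∧ R[m]? = R[m + x]?
    · rw [show krulLceB R (n:Int) (x:Int) (fuel+1) (m:Int) =
          krulLceB R (n:Int) (x:Int) fuel ((m:Int)+1) from by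
        simp only [krulLceB]; rw [if_pos (hC.mpr hg)]]
      rw [lceGo.eq_def, dif_pos hg]
      have e1 : (m:Int) + 1 = ((m+1 : Nat) : Int) := by push_cast; ring
      rw [e1]
      exact ih (m+1) (by omega)
    · rw [show krulLceB R (n:Int) (x:Int) (fuel+1) (m:Int) = (m:Int) from by
        simp only [krulLceB]; rw [if_neg (fun hc => hg (hC.mp hc))]]
      rw [lceGo.eq_def, dif_neg hg]

-- ===== VERDICT (by name: the statement is the Claim_ definition above) =====
theorem krul_spec : Claim_equal_krul := by
  intro L _
  unfold Spec_krul krul krul_alt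
  simp only [PySem.List.slice?_none_none_neg_one, Option.getD_some, PySem.List.len_eq,
    List.length_reverse, Int.natAbs_natCast]
  have hrange : PySem.Int.floordiv ((L.length:Int)+2) 2 = PySem.Int.floordiv (L.length:Int) 2 + 1 := by
    rw [PySem.Int.floordiv_eq_ediv_of_pos (by norm_num), PySem.Int.floordiv_eq_ediv_of_pos (by norm_num)]
    omega
  rw [hrange]
  apply PySem.List.foldl_congr_mem
  intro acc xi hmem
  rw [PySem.List.mem_pyRange_one] at hmem
  rw [PySem.Int.floordiv_eq_ediv_of_pos (by norm_num)] at hmem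
  obtain ⟨x', rfl⟩ : ∃ x' : Nat, xi = (x' : Int) := ⟨xi.toNat, by omega⟩
  have hx1 : 1 ≤ x' := by omega
  have hx2 : 2*x' ≤ L.length := by omega
  have hn : L.length = L.reverse.length := by simp
  have hen : lceGo L.reverse L.length x' 0 + x' ≤ L.length :=
    lceGo_add_le L.reverse L.length x' hn (by omega)
  have hM : PySem.List.slice L (some ((L.length:Int) - (x':Int))) (some (L.length:Int))
      = (segR L.reverse x' 0).reverse := by
    have := slice_block L x' 0 (by simpa using (by omega : x' ≤ L.length))
    convert this using 4 <;> push_cast <;> ring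
  have hA : krulWhileA L (L.length:Int) (x':Int) ((segR L.reverse x' 0).reverse) L.length ((1:Nat):Int)
        (PySem.List.slice L (some ((L.length:Int) - 2*(x':Int))) (some ((L.length:Int) - (x':Int))))
      = ((lceGo L.reverse L.length x' 0 / x' : Nat) : Int) + 1 := by
    have h1 := whileA_eq L x' hx1 hx2 L.length 1 (by omega) (by simp)
      (by have := Nat.div_le_self (lceGo L.reverse L.length x' 0) x'; omega)
    convert h1 using 4 <;> push_cast <;> ring
  have hB : krulLceB L.reverse (L.length:Int) (x':Int) L.length ((0:Nat):Int)
      = ((lceGo L.reverse L.length x' 0 : Nat) : Int) := by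
    exact lceB_eq L.reverse L.length x' L.length 0 (by omega)
  have hdiv : PySem.Int.floordiv ((lceGo L.reverse L.length x' 0 : Nat) : Int) ((x' : Nat) : Int)
      = ((lceGo L.reverse L.length x' 0 / x' : Nat) : Int) := PySem.Int.floordiv_natCast _ _
  rw [hM]
  rw [show ((1:Int)) = ((1:Nat):Int) from rfl, hA]
  rw [show ((0:Int)) = ((0:Nat):Int) from rfl, hB, hdiv]
  norm_cast
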